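-- pv_equiv track=rewrite | github.com/imdayoung/algorithm-study | 프로그래머스/구현/신규 아이디 추천.py | solution
-- ===== SOURCE A (Python) =====
-- def solution(new_id):
--     answer = ''
--
--     # 1단계, 2단계, 3단계
--     for char in new_id:
--         if char.isalpha():
--             answer += char.lower()
--         elif (char.isalpha() == False and char in ['-','_']) or (char == '.' and (len(answer) > 0 and answer[-1] != '.' or len(answer) == 0)) or char.isdigit():
--             answer += char
--     # 4단계
--     if len(answer) > 0 and answer[0] == '.':
--         answer = answer[1:]
--     if len(answer) > 0 and answer[-1] == '.':
--         answer = answer[:-1]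
--     # 5단계
--     if len(answer) == 0:
--         answer = 'a'
--     # 6단계
--     if len(answer) >= 16:
--         answer = answer[:15]
--     if answer[-1] == '.':
--         answer = answer[:-1]
--     # 7단계
--     while len(answer) <= 2:
--         answer += answer[-1]
--
--     return answer
-- ===== SOURCE B (Python) =====
-- def solution(new_id):
--     allowed = set('abcdefghijklmnopqrstuvwxyz0123456789-_.')
--     s = ''.join(c for c in new_id.lower() if c in allowed)
--     s = '.'.join(p for p in s.split('.') if p)
--     s = (s or 'a')[:15].rstrip('.')
--     return s.ljust(3, s[-1])
-- ===== Notes on version B (the rewrite author's own statement) =====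
-- stated objective: idiomatic
-- what changed: Replaces the stateful char-by-char accumulation loop (with inline last-char dot-collapse guard and separate leading/trailing dot strips) by a declarative pipeline: filter the lowered string against an allowed set, collapse and strip dots in one split/join step, default/truncate/rstrip, and pad with ljust.
import Mathlib
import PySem

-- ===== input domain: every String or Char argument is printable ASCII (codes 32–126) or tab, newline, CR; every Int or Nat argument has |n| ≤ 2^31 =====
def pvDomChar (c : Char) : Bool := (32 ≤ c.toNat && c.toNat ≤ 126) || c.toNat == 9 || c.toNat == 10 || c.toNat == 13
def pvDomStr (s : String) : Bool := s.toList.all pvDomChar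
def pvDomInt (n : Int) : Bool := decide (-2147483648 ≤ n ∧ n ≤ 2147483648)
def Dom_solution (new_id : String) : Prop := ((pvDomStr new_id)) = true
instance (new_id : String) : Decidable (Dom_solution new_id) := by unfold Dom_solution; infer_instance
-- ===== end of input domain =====

-- B replaces A's stateful char-accumulation loop by a declarative filter / split-join / slice / rstrip / ljust pipeline (objective: idiomatic).

-- ===== PORT A =====
-- one iteration of A's accumulation loop (steps 1–3)
def solAStep (answer : List Char) (c : Char) : List Char :=
  if PySem.Chars.isalpha c then answer ++ [PySem.Chars.lowerChar c]
  else if (((PySem.Chars.isalpha c == false) && (c == '-' || c == '_'))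
        || ((c == '.') && ((decide (0 < answer.length) && !(PySem.List.pyGet? answer (-1) == some '.')) || answer.length == 0)))
        || PySem.Chars.isdigit c
  then answer ++ [c] else answer

-- A's step-7 loop: 'while len(answer) <= 2: answer += answer[-1]'
def solAPad (answer : List Char) : List Char :=
  if h : answer.length ≤ 2 then
    match PySem.List.pyGet? answer (-1) with
    | some c => solAPad (answer ++ [c])
    | none => answer  -- Python raises IndexError here; unreachable (answer is nonempty when step 7 runs)
  else answer
termination_by 3 - answer.length
decreasing_by simp [List.length_append]; omega

def solution (new_id : String) : String :=
  let answer := new_id.toList.foldl solAStep []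
  -- step 4
  let answer := if 0 < answer.length ∧ PySem.List.pyGet? answer 0 = some '.' then PySem.List.slice answer (some 1) none else answer
  let answer := if 0 < answer.length ∧ PySem.List.pyGet? answer (-1) = some '.' then PySem.List.slice answer none (some (-1)) else answer
  -- step 5
  let answer := if answer.length = 0 then ['a'] else answer
  -- step 6
  let answer := if 16 ≤ answer.length then PySem.List.slice answer none (some 15) else answer
  let answer := if PySem.List.pyGet? answer (-1) = some '.' then PySem.List.slice answer none (some (-1)) else answer
  -- step 7
  String.ofList (solAPad answer)

-- ===== PORT B =====
-- allowed = set('abcdefghijklmnopqrstuvwxyz0123456789-_.')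
def solAllowed : PySem.Set Char := PySem.Set.ofList "abcdefghijklmnopqrstuvwxyz0123456789-_.".toList

def solution_alt (new_id : String) : String :=
  -- s = ''.join(c for c in new_id.lower() if c in allowed)
  let s := (PySem.Chars.lower new_id.toList).filter (fun c => solAllowed.contains c)
  -- s = '.'.join(p for p in s.split('.') if p)
  let s := PySem.Chars.join ['.'] ((PySem.Chars.splitOn s ['.']).filter (fun p => !p.isEmpty))
  -- s = (s or 'a')[:15].rstrip('.')
  let s := PySem.List.slice (if s.isEmpty then ['a'] else s) none (some 15)
  let s := (List.dropWhile (fun c => c == '.') s.reverse).reverse  -- hand port of s.rstrip('.'): drop trailing '.' chars (exact)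
  -- return s.ljust(3, s[-1])
  match PySem.List.pyGet? s (-1) with
  | some c => String.ofList (s ++ List.replicate (3 - s.length) c)  -- ljust(3, c): right-pad with c to length 3
  | none => String.ofList s  -- Python raises IndexError on ''[-1]; unreachable (s is nonempty here)

-- ===== PRECONDITION & SPEC =====
def Spec_solution (new_id : String) (out : String) : Prop := out = solution_alt new_id
instance (new_id : String) (out : String) : Decidable (Spec_solution new_id out) := by unfold Spec_solution; infer_instance

-- ===== CLAIM (what is proved, stated in full; the proofs are below) =====
def Claim_equal_solution : Prop := ∀ (new_id : String), Dom_solution new_id → Spec_solution new_id (solution new_id)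

-- ===== LEMMAS AND PROOFS =====

-- B's filter predicate, and the filtered-and-lowered character stream both programs agree on
def kp (c : Char) : Bool := solAllowed.contains c
def fm (cs : List Char) : List Char := (cs.map PySem.Chars.lowerChar).filter kp

-- A's in-loop dot collapse, as a two-state machine (flag = last kept char was '.')
def dcol (b : Bool) : List Char → List Char
  | [] => []
  | c :: t => if c == '.' && b then dcol b t else c :: dcol (c == '.') t

-- structural model of s.split('.')
def psplit : List Char → List (List Char)
  | [] => [[]]
  | c :: t => if c == '.' then [] :: psplit t else (psplit t).modifyHead (c :: ·)

-- '.'-join of the nonempty parts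
def jp : List (List Char) → List Char
  | [] => []
  | p :: rest => if p.isEmpty then jp rest else p ++ (if (jp rest).isEmpty then [] else '.' :: jp rest)

-- like jp, but the head part counts even when empty
def jpc : List (List Char) → List Char
  | [] => []
  | p :: rest => p ++ (if (jp rest).isEmpty then [] else '.' :: jp rest)

def K (v : List Char) : List Char := jp (psplit v)
def M (v : List Char) : List Char := jpc (psplit v)

-- drop one trailing '.'
def stripT1 : List Char → List Char
  | [] => []
  | [c] => if c == '.' then [] else [c]
  | c :: t => c :: stripT1 t

def NoAdj (l : List Char) : Prop := l.IsChain (fun a b => a ≠ '.' ∨ b ≠ '.')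

-- character classification driving the loop equivalence
def bKeep (c : Char) : Bool :=
  ((PySem.Chars.isalpha c == false) && (c == '-' || c == '_')) || PySem.Chars.isdigit c

def classOK (c : Char) : Bool :=
  (c == '.')
  || (PySem.Chars.isalpha c && kp (PySem.Chars.lowerChar c) && !(PySem.Chars.lowerChar c == '.'))
  || (!PySem.Chars.isalpha c && bKeep c && (PySem.Chars.lowerChar c == c) && !(c == '.') && kp c)
  || (!PySem.Chars.isalpha c && !bKeep c && !(c == '.') && (PySem.Chars.lowerChar c == c) && !kp c)

set_option maxRecDepth 8192 in
lemma classOK_lt127 : ∀ n < 127, classOK (Char.ofNat n) = true := by decide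

lemma classOK_of_dom (c : Char) (h : pvDomChar c = true) : classOK c = true := by
  have h127 : c.toNat < 127 := by
    simp [pvDomChar] at h; omega
  have := classOK_lt127 c.toNat h127
  rwa [Char.ofNat_toNat] at this

-- psplit never returns []
lemma psplit_exists (t : List Char) : ∃ p rest, psplit t = p :: rest := by
  induction t with
  | nil => exact ⟨[], [], rfl⟩
  | cons c r ih =>
    obtain ⟨p, rest, hp⟩ := ih
    by_cases hc : c = '.'
    · exact ⟨[], psplit r, by simp [psplit, hc]⟩
    · exact ⟨c :: p, rest, by simp [psplit, hc, hp]⟩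

-- K/M recurrences
lemma K_dot (t : List Char) : K ('.' :: t) = K t := by simp [K, psplit, jp]
lemma M_dot (t : List Char) : M ('.' :: t) = if (K t).isEmpty then [] else '.' :: K t := by
  simp [M, K, psplit, jpc]
lemma K_cons (c : Char) (t : List Char) (h : c ≠ '.') : K (c :: t) = c :: M t := by
  obtain ⟨p, rest, hp⟩ := psplit_exists t
  simp [K, M, psplit, h, hp, jp, jpc]
lemma M_cons (c : Char) (t : List Char) (h : c ≠ '.') : M (c :: t) = c :: M t := by
  obtain ⟨p, rest, hp⟩ := psplit_exists t
  simp [M, psplit, h, hp, jpc]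

-- split-join side: PySem.Chars.splitOn matches psplit, join of nonempty parts matches jp
lemma go_spec : ∀ (fuel : Nat) (l cur : List Char) (acc : List (List Char)), l.length ≤ fuel →
    PySem.Chars.splitOn.go ['.'] fuel l cur acc = acc.reverse ++ (psplit l).modifyHead (cur.reverse ++ ·) := by
  intro fuel
  induction fuel with
  | zero =>
    intro l cur acc hl
    have : l = [] := by cases l <;> simp_all
    subst this
    simp [PySem.Chars.splitOn.go, psplit]
  | succ n ih =>
    intro l cur acc hl
    cases l with
    | nil => simp [PySem.Chars.splitOn.go, psplit]
    | cons c rest =>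
      by_cases hc : c = '.'
      · subst hc
        rw [show PySem.Chars.splitOn.go ['.'] (n+1) ('.' :: rest) cur acc
              = PySem.Chars.splitOn.go ['.'] n rest [] (cur.reverse :: acc) by
            simp [PySem.Chars.splitOn.go, List.isPrefixOf]]
        rw [ih rest [] (cur.reverse :: acc) (by simpa using Nat.le_of_succ_le_succ hl)]
        obtain ⟨p, r, hp⟩ := psplit_exists rest
        simp [psplit, hp]
      · rw [show PySem.Chars.splitOn.go ['.'] (n+1) (c :: rest) cur acc
              = PySem.Chars.splitOn.go ['.'] n rest (c :: cur) acc by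
            simp [PySem.Chars.splitOn.go, List.isPrefixOf, hc, Ne.symm hc]]
        rw [ih rest (c :: cur) acc (by simpa using Nat.le_of_succ_le_succ hl)]
        obtain ⟨p, r, hp⟩ := psplit_exists rest
        simp [psplit, hp, hc]

lemma splitOn_dot (v : List Char) : PySem.Chars.splitOn v ['.'] = psplit v := by
  rw [PySem.Chars.splitOn, go_spec (v.length + 1) v [] [] (by omega)]
  obtain ⟨p, r, hp⟩ := psplit_exists v
  simp [hp]

lemma jp_join : ∀ ps : List (List Char),
    PySem.Chars.join ['.'] (ps.filter (fun p => !p.isEmpty)) = jp ps ∧ (jp ps = [] ↔ ps.filter (fun p => !p.isEmpty) = []) := by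
  intro ps
  induction ps with
  | nil => simp [PySem.Chars.join, jp, List.intercalate]
  | cons p rest ih =>
    obtain ⟨h1, h2⟩ := ih
    by_cases hp : p = []
    · subst hp
      refine ⟨by simpa [jp] using h1, ?_⟩
      rw [show (List.filter (fun p => !p.isEmpty) ([] :: rest)) = List.filter (fun p => !p.isEmpty) rest by simp,
        show jp ([] :: rest) = jp rest by simp [jp]]
      exact h2
    · cases hr : rest.filter (fun p => !p.isEmpty) with
      | nil =>
        have hjr : jp rest = [] := h2.mpr hr
        constructor
        · simp [List.filter_cons, hp, hr, PySem.Chars.join, List.intercalate, jp, hjr,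
            List.isEmpty_iff]
        · simp [jp, List.isEmpty_iff, hp, hjr, List.filter_cons, hr]
      | cons q more =>
        have hjr : jp rest ≠ [] := fun h => by simp [h2.mp h] at hr
        have hjoin : PySem.Chars.join ['.'] (p :: q :: more) = p ++ '.' :: PySem.Chars.join ['.'] (q :: more) := by
          simp [PySem.Chars.join, List.intercalate, List.intersperse]
        constructor
        · rw [List.filter_cons, if_pos (by simp [List.isEmpty_iff, hp]), hr, hjoin, ← hr, h1]
          simp [jp, List.isEmpty_iff, hp, hjr]
        · simp [jp, List.isEmpty_iff, hp, hjr, List.filter_cons, hr]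

-- stage 1: A's loop computes the dot-collapse of the filtered lowered stream
set_option maxRecDepth 8192 in
lemma foldA (cs : List Char) (h : ∀ c ∈ cs, pvDomChar c = true) :
    ∀ ans, cs.foldl solAStep ans = ans ++ dcol (ans.getLast? == some '.') (fm cs) := by
  induction cs with
  | nil => intro ans; simp [fm, dcol]
  | cons c t ih =>
    intro ans
    have hdc := classOK_of_dom c (h c (by simp))
    have ht : ∀ x ∈ t, pvDomChar x = true := fun x hx => h x (by simp [hx])
    rw [List.foldl_cons, ih ht]
    simp only [classOK, Bool.or_eq_true, Bool.and_eq_true, beq_iff_eq, Bool.not_eq_true',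
      beq_eq_false_iff_ne, ne_eq] at hdc
    rcases hdc with ((hdot | ⟨⟨ha, hkp⟩, hlcne⟩) | ⟨⟨⟨⟨hna, hbk⟩, hlc⟩, hne⟩, hkp⟩) | ⟨⟨⟨⟨hna, hbk⟩, hne⟩, hlc⟩, hkp⟩
    · -- c = '.'
      subst hdot
      have h1 : PySem.Chars.isalpha '.' = false := by decide
      have h2 : PySem.Chars.isdigit '.' = false := by decide
      have hfm : fm ('.' :: t) = '.' :: fm t := by
        simp [fm, show PySem.Chars.lowerChar '.' = '.' by decide, show kp '.' = true by decide]
      rw [hfm]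
      by_cases hans : ans = []
      · subst hans
        simp [solAStep, dcol, h1, h2]
      · obtain ⟨a, hla⟩ := Option.isSome_iff_exists.mp (List.getLast?_isSome.mpr hans)
        have hpg : PySem.List.pyGet? ans (-1) = some a := by
          rw [PySem.List.pyGet?_neg_one, hla]
        have hlen : (0 : Nat) < ans.length := List.length_pos_iff.mpr hans
        by_cases hadot : a = '.'
        · have hstep : solAStep ans '.' = ans := by
            simp [solAStep, h1, h2, hpg, hadot, hlen, hans]
          rw [hstep]
          simp [dcol, hla, hadot]
        · have hstep : solAStep ans '.' = ans ++ ['.'] := by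
            simp [solAStep, h1, h2, hpg, hadot, hlen]
          rw [hstep]
          simp [dcol, hla, hadot, List.append_assoc]
    · -- letters
      have hfm : fm (c :: t) = PySem.Chars.lowerChar c :: fm t := by simp [fm, hkp]
      have hstep : solAStep ans c = ans ++ [PySem.Chars.lowerChar c] := by simp [solAStep, ha]
      rw [hfm, hstep]
      simp [dcol, hlcne, List.append_assoc]
    · -- '-', '_', digits
      have hcd : (c == '.') = false := by simp [hne]
      have hbk' := hbk
      simp only [bKeep, Bool.or_eq_true] at hbk'
      have hfm : fm (c :: t) = c :: fm t := by simp [fm, hlc, hkp]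
      have hx' : c = '-' ∨ c = '_' ∨ PySem.Chars.isdigit c = true := by
        rcases hbk' with hx | hd
        · simp [hna] at hx; tauto
        · tauto
      have hstep : solAStep ans c = ans ++ [c] := by
        simp only [solAStep, hna, hcd]
        simp
        intro hd1 hd2
        rcases hx' with rfl | rfl | hd
        · exact absurd rfl hd1
        · exact absurd rfl hd2
        · exact hd
      rw [hfm, hstep]
      simp [dcol, hne, List.append_assoc]
    · -- dropped characters
      have hcd : (c == '.') = false := by simp [hne]
      have hbk' := hbk
      simp only [bKeep, Bool.or_eq_false_iff, Bool.and_eq_false_iff] at hbk'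
      have hfm : fm (c :: t) = fm t := by simp [fm, hlc, hkp]
      have hdash : (c == '-') = false ∧ (c == '_') = false := by
        rcases hbk'.1 with hx | hx
        · simp [hna] at hx
        · exact hx
      have hstep : solAStep ans c = ans := by
        simp [solAStep, hna, hcd, hdash.1, hdash.2, hbk'.2]
      rw [hfm, hstep]

-- stage 2: stripping on the collapsed stream equals join-of-nonempty-split
lemma stripT1_cons_ne (c : Char) (w : List Char) (h : w ≠ []) :
    stripT1 (c :: w) = c :: stripT1 w := by
  cases w with
  | nil => contradiction
  | cons a b => rfl

lemma dcol_triple (v : List Char) :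
    stripT1 (dcol false v) = M v ∧ stripT1 (dcol true v) = K v ∧ (dcol true v = [] ↔ K v = []) := by
  induction v with
  | nil => exact ⟨rfl, rfl, by simp [dcol, K, psplit, jp]⟩
  | cons c t ih =>
    obtain ⟨ih1, ih2, ih3⟩ := ih
    by_cases hc : c = '.'
    · subst hc
      refine ⟨?_, ?_, ?_⟩
      · rw [show dcol false ('.' :: t) = '.' :: dcol true t by simp [dcol], M_dot]
        cases hdt : dcol true t with
        | nil => simp [stripT1, ih3.mp hdt]
        | cons x xs =>
          have hK : ¬ K t = [] := fun h => by rw [ih3.mpr h] at hdt; simp at hdt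
          rw [stripT1_cons_ne _ _ (by simp), ← hdt, ih2]
          simp [List.isEmpty_iff, hK]
      · rw [show dcol true ('.' :: t) = dcol true t by simp [dcol], ih2, K_dot]
      · rw [show dcol true ('.' :: t) = dcol true t by simp [dcol], K_dot]; exact ih3
    · have hstep : ∀ b, dcol b (c :: t) = c :: dcol false t := by
        intro b; simp [dcol, show (c == '.') = false by simp [hc]]
      refine ⟨?_, ?_, ?_⟩
      · rw [hstep, M_cons c t hc]
        cases hdf : dcol false t with
        | nil => rw [← ih1, hdf]; simp [stripT1, hc]
        | cons x xs => rw [stripT1_cons_ne _ _ (by simp), ← hdf, ih1]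
      · rw [hstep, K_cons c t hc]
        cases hdf : dcol false t with
        | nil => rw [← ih1, hdf]; simp [stripT1, hc]
        | cons x xs => rw [stripT1_cons_ne _ _ (by simp), ← hdf, ih1]
      · rw [hstep, K_cons c t hc]; simp

-- structural invariants of K and M
lemma KM_props (v : List Char) :
    ((K v).head? ≠ some '.' ∧ (K v).getLast? ≠ some '.' ∧ NoAdj (K v)) ∧
    ((M v).getLast? ≠ some '.' ∧ NoAdj (M v)) := by
  induction v with
  | nil =>
    refine ⟨⟨by simp [K, psplit, jp], by simp [K, psplit, jp], ?_⟩, by simp [M, psplit, jpc, jp], ?_⟩ <;>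
      · show List.IsChain _ _
        first
        | (rw [show K [] = [] from rfl]; exact List.IsChain.nil)
        | (rw [show M [] = [] from rfl]; exact List.IsChain.nil)
  | cons c t ih =>
    obtain ⟨⟨ihK1, ihK2, ihK3⟩, ihM1, ihM2⟩ := ih
    by_cases hc : c = '.'
    · subst hc
      rw [K_dot, M_dot]
      refine ⟨⟨ihK1, ihK2, ihK3⟩, ?_, ?_⟩
      · cases hK : K t with
        | nil => simp
        | cons x xs =>
          rw [hK] at ihK2
          rw [if_neg (by simp)]
          simpa [List.getLast?_cons_cons] using ihK2
      · cases hK : K t with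
        | nil => rw [if_pos (by simp)]; exact List.IsChain.nil
        | cons x xs =>
          rw [hK] at ihK1 ihK3
          rw [if_neg (by simp)]
          exact List.IsChain.cons_cons (Or.inr (by simpa using ihK1)) ihK3
    · rw [K_cons c t hc, M_cons c t hc]
      have hlast : (c :: M t).getLast? ≠ some '.' := by
        cases hM : M t with
        | nil => simpa using hc
        | cons y ys => rw [hM] at ihM1; simpa [List.getLast?_cons_cons] using ihM1
      have hchain : NoAdj (c :: M t) := by
        cases hM : M t with
        | nil => exact List.IsChain.singleton c
        | cons y ys =>
          rw [hM] at ihM2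
          exact List.IsChain.cons_cons (Or.inl hc) ihM2
      exact ⟨⟨by simpa using hc, hlast, hchain⟩, hlast, hchain⟩

lemma rstrip1 (l : List Char) (hne : l ≠ []) (hh : l.head? ≠ some '.') (hc : NoAdj l) :
    (List.dropWhile (fun c => c == '.') l.reverse).reverse =
      if l.getLast? = some '.' then l.dropLast else l := by
  rcases List.eq_nil_or_concat l with rfl | ⟨l', a, rfl⟩
  · exact absurd rfl hne
  · simp only [List.concat_eq_append] at hne hh hc ⊢
    rw [List.reverse_append, List.reverse_singleton, List.singleton_append]
    by_cases ha : a = '.'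
    · subst ha
      rw [List.dropWhile_cons_of_pos (by simp)]
      rw [if_pos (by simp [List.getLast?_concat]), List.dropLast_concat]
      have hl' : l' ≠ [] := by
        rintro rfl
        simp at hh
      rcases List.eq_nil_or_concat l' with rfl | ⟨l'', b, rfl⟩
      · exact absurd rfl hl'
      · simp only [List.concat_eq_append] at *
        have hb : b ≠ '.' := by
          have := (List.isChain_append.mp hc).2.2
          have hr := this b (by simp [List.getLast?_concat]) '.' (by simp)
          tauto
        rw [List.reverse_append, List.reverse_singleton, List.singleton_append]
        rw [List.dropWhile_cons_of_neg (by simp [hb])]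
        simp
    · rw [List.dropWhile_cons_of_neg (by simp [ha])]
      rw [if_neg (by simp [List.getLast?_concat, ha])]
      simp

-- A's pad loop equals right-padding to length 3
lemma pad_eq (r : List Char) (c : Char) (h : r.getLast? = some c) :
    solAPad r = r ++ List.replicate (3 - r.length) c := by
  rcases r with _ | ⟨x, _ | ⟨y, _ | ⟨z, t⟩⟩⟩
  · simp at h
  · obtain rfl : x = c := by simpa using h
    simp [solAPad, PySem.List.pyGet?_neg_one]
  · obtain rfl : y = c := by simpa using h
    simp [solAPad, PySem.List.pyGet?_neg_one]
  · have hlen : ¬((x :: y :: z :: t).length ≤ 2) := by simp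
    rw [solAPad, dif_neg hlen]
    simp

lemma stripT1_concat (l : List Char) (a : Char) :
    stripT1 (l ++ [a]) = if a == '.' then l else l ++ [a] := by
  induction l with
  | nil => simp [stripT1]
  | cons x xs ih =>
    rw [List.cons_append, stripT1_cons_ne x _ (by simp), ih]
    split_ifs <;> simp

lemma stripT1_eq_if (l : List Char) :
    stripT1 l = if l.getLast? = some '.' then l.dropLast else l := by
  rcases List.eq_nil_or_concat l with rfl | ⟨l', a, rfl⟩
  · simp [stripT1]
  · simp only [List.concat_eq_append]
    rw [stripT1_concat, List.getLast?_concat, List.dropLast_concat]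
    by_cases ha : a = '.' <;> simp [ha]

-- A's two trailing-dot strips, written with PySem primitives, are stripT1
lemma stripT1_if (l : List Char) :
    (if PySem.List.pyGet? l (-1) = some '.' then PySem.List.slice l none (some (-1)) else l) = stripT1 l := by
  rw [stripT1_eq_if, PySem.List.pyGet?_neg_one, PySem.List.slice_to_neg_one]

lemma stripT1_if' (l : List Char) :
    (if 0 < l.length ∧ PySem.List.pyGet? l (-1) = some '.' then PySem.List.slice l none (some (-1)) else l) = stripT1 l := by
  rw [← stripT1_if l]
  by_cases h : PySem.List.pyGet? l (-1) = some '.'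
  · have hl : l ≠ [] := by
      rintro rfl
      rw [PySem.List.pyGet?_neg_one] at h
      simp at h
    simp [h, List.length_pos_iff.mpr hl]
  · simp [h]

-- A's step 4 on the collapsed stream yields the join-of-nonempty-split
lemma afterK (v : List Char) :
    stripT1 (if 0 < (dcol false v).length ∧ PySem.List.pyGet? (dcol false v) 0 = some '.'
             then PySem.List.slice (dcol false v) (some 1) none else dcol false v) = K v := by
  cases v with
  | nil => simp [dcol, stripT1, K, psplit, jp]
  | cons c t =>
    by_cases hc : c = '.'
    · subst hc
      rw [show dcol false ('.' :: t) = '.' :: dcol true t by simp [dcol]]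
      rw [if_pos ⟨by simp, by simp [pysem]⟩, PySem.List.slice_from_one]
      simp only [List.tail_cons]
      rw [(dcol_triple t).2.1, K_dot]
    · rw [show dcol false (c :: t) = c :: dcol false t by simp [dcol, show (c == '.') = false by simp [hc]]]
      rw [if_neg (by simp [pysem, hc])]
      rw [K_cons c t hc]
      cases hdf : dcol false t with
      | nil => rw [← (dcol_triple t).1, hdf]; simp [stripT1, hc]
      | cons x xs => rw [stripT1_cons_ne _ _ (by simp), ← hdf, (dcol_triple t).1]

lemma stripT1_ne_nil (l : List Char) (hne : l ≠ []) (hh : l.head? ≠ some '.') : stripT1 l ≠ [] := by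
  rw [stripT1_eq_if]
  rcases List.eq_nil_or_concat l with rfl | ⟨l', a, rfl⟩
  · exact absurd rfl hne
  · simp only [List.concat_eq_append] at hh ⊢
    by_cases ha : a = '.'
    · subst ha
      rw [if_pos (by simp), List.dropLast_concat]
      rintro rfl
      simp at hh
    · rw [if_neg (by simp [ha])]
      simp

-- ===== VERDICT (by name: the statement is the Claim_ definition above) =====
theorem solution_spec : Claim_equal_solution := by
  intro new_id hdom
  unfold Spec_solution solution solution_alt
  have hdomc : ∀ c ∈ new_id.toList, pvDomChar c = true := by
    simpa [Dom_solution, pvDomStr, List.all_eq_true] using hdom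
  simp only [List.isEmpty_iff, List.length_eq_zero_iff]
  rw [foldA new_id.toList hdomc []]
  rw [show (([] : List Char).getLast? == some '.') = false from rfl, List.nil_append]
  -- B's filtered stream is fm
  rw [show (PySem.Chars.lower new_id.toList).filter (fun c => solAllowed.contains c) = fm new_id.toList
       from rfl]
  set v := fm new_id.toList with hv
  -- B's split-join is K v
  rw [splitOn_dot, (jp_join (psplit v)).1]
  rw [show jp (psplit v) = K v from rfl]
  -- A's step 4 is K v
  rw [stripT1_if', afterK]
  -- step 5
  set w := if K v = [] then ['a'] else K v with hw
  have hKprops := KM_props v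
  have hw_ne : w ≠ [] := by
    rw [hw]; split_ifs with h
    · simp
    · exact h
  have hw_head : w.head? ≠ some '.' := by
    rw [hw]; split_ifs with h
    · simp
    · exact hKprops.1.1
  have hw_chain : NoAdj w := by
    rw [hw]; split_ifs with h
    · exact List.IsChain.singleton 'a'
    · exact hKprops.1.2.2
  -- step 6: both sides truncate to 15
  rw [show (if 16 ≤ w.length then PySem.List.slice w none (some 15) else w) = w.take 15 from by
        split_ifs with h
        · rw [PySem.List.slice_to _ (by norm_num)]; rfl
        · exact (List.take_of_length_le (by omega)).symm]
  rw [show PySem.List.slice w none (some 15) = w.take 15 from by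
        rw [PySem.List.slice_to _ (by norm_num)]; rfl]
  set u := w.take 15 with hu
  have hu_ne : u ≠ [] := by
    rw [hu]
    simp [List.take_eq_nil_iff, hw_ne]
  have hu_head : u.head? ≠ some '.' := by
    rw [hu, List.head?_take]
    simpa using hw_head
  have hu_chain : NoAdj u := List.IsChain.take hw_chain 15
  -- trailing-dot strip after truncation
  rw [stripT1_if u, rstrip1 u hu_ne hu_head hu_chain, ← stripT1_eq_if u]
  set r := stripT1 u with hr
  have hr_ne : r ≠ [] := stripT1_ne_nil u hu_ne hu_head
  obtain ⟨c0, hc0⟩ := Option.isSome_iff_exists.mp (List.getLast?_isSome.mpr hr_ne)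
  -- padding
  rw [pad_eq r c0 hc0, PySem.List.pyGet?_neg_one, hc0]
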